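-- pv_equiv track=rewrite | github.com/TimothyNguyen/SWEPrep | company/ixl_learning/cardPackets.py | cardPackets
-- ===== SOURCE A (Python) =====
-- def cardPackets(cardTypes):
--     ans = len(cardTypes)
--     max_num = max(cardTypes)
--
--     cnt = [0] * (max_num + 1)
--     for i in range(len(cardTypes)):
--         cnt[cardTypes[i]] += 1
--
--     for digit in range(2, max_num + 1):
--         temp_ans = 0
--         i = 0
--         while i <= max_num and temp_ans < ans:
--             temp_ans += cnt[i] * ((digit - (i % digit)) % digit)
--             i += 1
--         ans = min(ans, temp_ans)
--     return ans
-- ===== SOURCE B (Python) =====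
-- def cardPackets(cardTypes):
--     n = len(cardTypes)
--     m = max(cardTypes)
--     cnt = [0] * (m + 2)
--     for x in cardTypes:
--         cnt[x] += 1
--     # suf[j] = number of cards with value >= j
--     suf = [0] * (m + 2)
--     for j in range(m, 0, -1):
--         suf[j] = suf[j + 1] + cnt[j]
--     total = sum(cardTypes)
--     best = n
--     for d in range(2, m + 1):
--         s = 0
--         for j in range(1, m + 1, d):
--             s += suf[j]
--         best = min(best, d * s - total)
--     return best
-- ===== Notes on version B (the rewrite author's own statement) =====
-- stated objective: alternative
-- what changed: A rescans all max_num+1 count slots for every divisor (early-exiting on the running best); B instead builds a suffix-count array once and, per divisor d, sums it at stride d (cost(d) = d*sum_k suf[1+k*d] - sum(cards)), a harmonic-series sieve.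
-- outside the precondition, e.g. on cardPackets([2, -1]): A returns 0, B returns 1; on cardPackets([3, 9, -32, 148]): A returns 2, B returns 4; on cardPackets([]): A raises ValueError, B raises ValueError
import Mathlib
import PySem

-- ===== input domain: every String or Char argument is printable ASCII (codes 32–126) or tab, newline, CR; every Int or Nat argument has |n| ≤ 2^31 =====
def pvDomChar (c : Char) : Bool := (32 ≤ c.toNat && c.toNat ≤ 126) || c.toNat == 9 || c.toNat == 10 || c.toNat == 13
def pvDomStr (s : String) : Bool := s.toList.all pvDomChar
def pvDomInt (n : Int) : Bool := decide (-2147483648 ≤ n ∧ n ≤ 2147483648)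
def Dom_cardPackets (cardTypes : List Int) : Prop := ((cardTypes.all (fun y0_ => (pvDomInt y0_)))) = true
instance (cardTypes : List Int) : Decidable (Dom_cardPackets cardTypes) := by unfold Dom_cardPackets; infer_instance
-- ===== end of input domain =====

-- B replaces A's per-divisor O(max) scan by suffix counts summed at stride d (harmonic sieve);
-- equivalence of the RETURN value is proved on nonempty lists of nonnegative ints (the natural domain).

-- ===== PORT A =====
-- Python list read a[j] (negative index wraps once; out of range -> IndexError, excluded by Pre_; default 0 here)
def pvArrGet (a : Array Int) (j : Int) : Int :=
  match PySem.List.pyIdx? a.size j with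
  | some k => a[k]!
  | none => 0

-- Python list write a[j] = v (negative index wraps once; out of range -> IndexError, excluded by Pre_; no-op here)
def pvArrSet (a : Array Int) (j : Int) (v : Int) : Array Int :=
  match PySem.List.pyIdx? a.size j with
  | some k => a.setIfInBounds k v
  | none => a

-- shared by both ports: Python 'cnt[j] += 1'
def pvBump (cnt : Array Int) (j : Int) : Array Int :=
  pvArrSet cnt j (pvArrGet cnt j + 1)

-- A's 'while i <= max_num and temp_ans < ans' loop
def pvWhileA (cnt : Array Int) (digit maxn ans i temp : Int) : Int :=
  if _h : i ≤ maxn ∧ temp < ans then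
    pvWhileA cnt digit maxn ans (i + 1)
      (temp + pvArrGet cnt i * PySem.Int.mod (digit - PySem.Int.mod i digit) digit)
  else temp
termination_by (maxn + 1 - i).toNat
decreasing_by omega

def cardPackets (cardTypes : List Int) : Int :=
  match PySem.List.max? cardTypes (fun x => x) with
  | none => 0   -- max([]) raises ValueError: excluded by Pre_
  | some max_num =>
    let cnt := (PySem.List.pyRange 0 (cardTypes.length : Int)).foldl
      (fun c i => pvBump c (PySem.List.pyGetD cardTypes i 0))
      (Array.replicate (max_num + 1).toNat 0)
    (PySem.List.pyRange 2 (max_num + 1)).foldl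
      (fun ans digit => min ans (pvWhileA cnt digit max_num ans 0 0))
      (cardTypes.length : Int)

-- ===== PORT B =====
def cardPackets_alt (cardTypes : List Int) : Int :=
  match PySem.List.max? cardTypes (fun x => x) with
  | none => 0   -- max([]) raises ValueError: excluded by Pre_
  | some m =>
    let cnt := cardTypes.foldl pvBump (Array.replicate (m + 2).toNat 0)
    let suf := (PySem.List.pyRange m 0 (-1)).foldl
      (fun s j => pvArrSet s j (pvArrGet s (j + 1) + pvArrGet cnt j))
      (Array.replicate (m + 2).toNat 0)
    let total := cardTypes.sum
    (PySem.List.pyRange 2 (m + 1)).foldl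
      (fun best d =>
        min best (d * ((PySem.List.pyRange 1 (m + 1) d).foldl
          (fun s j => s + pvArrGet suf j) 0) - total))
      (cardTypes.length : Int)

-- ===== PRECONDITION & SPEC =====
-- Pre_ restricts to the function's natural domain — nonempty lists of nonnegative card counts:
-- max([]) raises ValueError, and on negative entries both programs index their counting arrays
-- with negative (Python-wrapping) indices, which is no part of the task.
def Pre_cardPackets (cardTypes : List Int) : Prop :=
  cardTypes ≠ [] ∧ ∀ x ∈ cardTypes, 0 ≤ x
instance (cardTypes : List Int) : Decidable (Pre_cardPackets cardTypes) := by
  unfold Pre_cardPackets; infer_instance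

def pvWitness_cardPackets : List Int := [3, 1, 2]

def Spec_cardPackets (cardTypes : List Int) (out : Int) : Prop := out = cardPackets_alt cardTypes
instance (cardTypes : List Int) (out : Int) : Decidable (Spec_cardPackets cardTypes out) := by
  unfold Spec_cardPackets; infer_instance

-- ===== CLAIM (what is proved, stated in full; the proofs are below) =====
def Claim_equal_cardPackets : Prop := ∀ (cardTypes : List Int), Dom_cardPackets cardTypes → Pre_cardPackets cardTypes → Spec_cardPackets cardTypes (cardPackets cardTypes)

-- ===== LEMMAS AND PROOFS =====

-- list-level models of the ports' array operations (the bridges pvArrGet_eq/pvArrSet_toList relate them)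
def pvBumpL (cnt : List Int) (j : Int) : List Int :=
  PySem.List.pySetD cnt j (PySem.List.pyGetD cnt j 0 + 1)

def pvWhileL (cnt : List Int) (digit maxn ans i temp : Int) : Int :=
  if _h : i ≤ maxn ∧ temp < ans then
    pvWhileL cnt digit maxn ans (i + 1)
      (temp + PySem.List.pyGetD cnt i 0 * PySem.Int.mod (digit - PySem.Int.mod i digit) digit)
  else temp
termination_by (maxn + 1 - i).toNat
decreasing_by omega

lemma pyIdx?_lt (n : Nat) (j : Int) (k : Nat) (h : PySem.List.pyIdx? n j = some k) : k < n := by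
  unfold PySem.List.pyIdx? at h
  split_ifs at h with h1 h2 h3 <;> simp at h <;> omega

lemma pvArrGet_eq (a : Array Int) (j : Int) :
    pvArrGet a j = PySem.List.pyGetD a.toList j 0 := by
  unfold pvArrGet
  rw [PySem.List.pyGetD, PySem.List.pyGet?]
  cases h : PySem.List.pyIdx? a.size j with
  | none =>
    have : PySem.List.pyIdx? a.toList.length j = none := by rwa [Array.length_toList]
    simp [this]
  | some k =>
    have hk := pyIdx?_lt a.size j k h
    have h2 : PySem.List.pyIdx? a.toList.length j = some k := by rwa [Array.length_toList]
    simp only [Option.bind_some]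
    rw [show a.toList[k]? = some a.toList[k] from List.getElem?_eq_getElem (by simp [hk])]
    simp [getElem!_pos, hk]

lemma pvArrSet_toList (a : Array Int) (j : Int) (v : Int) :
    (pvArrSet a j v).toList = PySem.List.pySetD a.toList j v := by
  unfold pvArrSet
  rw [PySem.List.pySetD, PySem.List.pySet?]
  cases h : PySem.List.pyIdx? a.size j with
  | none => simp [Array.length_toList, h]
  | some k =>
    have hk := pyIdx?_lt a.size j k h
    simp [Array.length_toList, h]

lemma foldl_toList {F : Array Int → Int → Array Int} {G : List Int → Int → List Int}
    (hFG : ∀ a x, (F a x).toList = G a.toList x) :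
    ∀ (L : List Int) (a : Array Int), (L.foldl F a).toList = L.foldl G a.toList := by
  intro L
  induction L with
  | nil => intro a; rfl
  | cons x L ih => intro a; rw [List.foldl_cons, List.foldl_cons, ih, hFG]

lemma pvBump_toList (a : Array Int) (j : Int) :
    (pvBump a j).toList = pvBumpL a.toList j := by
  unfold pvBump pvBumpL
  rw [pvArrSet_toList, pvArrGet_eq]

lemma pvWhileA_eq (cnt : Array Int) (d m ans : Int) :
    ∀ (n : Nat) (i temp : Int), (m + 1 - i).toNat = n →
      pvWhileA cnt d m ans i temp = pvWhileL cnt.toList d m ans i temp := by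
  intro n
  induction n with
  | zero =>
    intro i temp hn
    rw [pvWhileA, pvWhileL, dif_neg (by omega), dif_neg (by omega)]
  | succ n ih =>
    intro i temp hn
    rw [pvWhileA, pvWhileL]
    by_cases hc : i ≤ m ∧ temp < ans
    · rw [dif_pos hc, dif_pos hc, pvArrGet_eq, ih (i + 1) _ (by omega)]
    · rw [dif_neg hc, dif_neg hc]


lemma pvBumpL_getD (c : List Int) (x : Int) (i : Nat) (hx : 0 ≤ x) (hxl : x < (c.length : Int)) :
    PySem.List.pyGetD (pvBumpL c x) (i : Int) 0 =
      if (i : Int) = x then PySem.List.pyGetD c (i : Int) 0 + 1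
      else PySem.List.pyGetD c (i : Int) 0 := by
  have hx' : x = ((x.toNat : Nat) : Int) := by omega
  have hlt : x.toNat < c.length := by omega
  rw [hx']
  unfold pvBumpL
  rw [PySem.List.pyGetD_pySetD_natCast c x.toNat i _ 0 hlt]
  have he : (i = x.toNat) ↔ ((i : Int) = ((x.toNat : Nat) : Int)) := by omega
  split_ifs with h1 h2 h2
  · rw [h2]
  · exact absurd (he.mp h1) h2
  · exact absurd (he.mpr h2) h1
  · rfl

lemma foldl_pvBumpL_getD (l : List Int) (c : List Int)
    (h : ∀ x ∈ l, 0 ≤ x ∧ x < (c.length : Int)) (i : Nat) :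
    PySem.List.pyGetD (l.foldl pvBumpL c) (i : Int) 0 =
      PySem.List.pyGetD c (i : Int) 0 + (l.count (i : Int) : Int) := by
  induction l generalizing c with
  | nil => simp
  | cons a l ih =>
    have ha := h a (by simp)
    have h' : ∀ x ∈ l, 0 ≤ x ∧ x < ((pvBumpL c a).length : Int) := by
      intro x hxm
      have := h x (by simp [hxm])
      simpa [pvBumpL, PySem.List.length_pySetD] using this
    rw [List.foldl_cons, ih _ h', pvBumpL_getD c a i ha.1 ha.2, List.count_cons]
    split_ifs with h1 <;> simp_all <;> push_cast <;> ring

lemma sum_map_ite_single (R : List Int) (x : Int) (g : Int → Int) (hN : R.Nodup) :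
    (R.map (fun i => if i = x then g i else 0)).sum = if x ∈ R then g x else 0 := by
  induction R with
  | nil => simp
  | cons a R ih =>
    have hN' := hN.of_cons
    rw [List.map_cons, List.sum_cons, ih hN']
    by_cases hax : a = x
    · subst hax
      have hnx : a ∉ R := (List.nodup_cons.mp hN).1
      simp [hnx]
    · simp [hax, List.mem_cons, Ne.symm hax]

lemma sum_count_mul (R : List Int) (g : Int → Int) (hN : R.Nodup) :
    ∀ l : List Int, (∀ x ∈ l, x ∈ R) →
      (R.map (fun i => (l.count i : Int) * g i)).sum = (l.map g).sum := by
  intro l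
  induction l with
  | nil => simp
  | cons a l ih =>
    intro h
    have ha : a ∈ R := h a (by simp)
    have h' : ∀ x ∈ l, x ∈ R := fun x hx => h x (by simp [hx])
    have step : (R.map (fun i => ((a :: l).count i : Int) * g i)).sum =
        (R.map (fun i => (l.count i : Int) * g i)).sum +
        (R.map (fun i => if i = a then g i else 0)).sum := by
      rw [← PySem.List.sum_map_add_int]
      apply congrArg List.sum
      apply List.map_congr_left
      intro i _
      rw [List.count_cons]
      by_cases hia : i = a
      · simp [hia]
        push_cast
        ring
      · simp [hia]
        exact Or.inl (Ne.symm hia)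
    rw [step, ih h', sum_map_ite_single R a g hN]
    simp [ha, List.map_cons, List.sum_cons]
    ring

lemma sum_count_eq_countP (m a : Int) :
    ∀ l : List Int, (∀ x ∈ l, 0 ≤ x ∧ x ≤ m) →
      ((PySem.List.pyRange a (m + 1)).map (fun i => (l.count i : Int))).sum =
        (l.countP (fun x => a ≤ x) : Int) := by
  intro l
  induction l with
  | nil => simp
  | cons b l ih =>
    intro h
    have hb := h b (by simp)
    have h' : ∀ x ∈ l, 0 ≤ x ∧ x ≤ m := fun x hx => h x (by simp [hx])
    have hN := PySem.List.nodup_pyRange_one (a := a) (b := m + 1)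
    have step : ((PySem.List.pyRange a (m + 1)).map (fun i => ((b :: l).count i : Int))).sum =
        ((PySem.List.pyRange a (m + 1)).map (fun i => (l.count i : Int))).sum +
        ((PySem.List.pyRange a (m + 1)).map (fun i => if i = b then (1 : Int) else 0)).sum := by
      rw [← PySem.List.sum_map_add_int]
      apply congrArg List.sum
      apply List.map_congr_left
      intro i _
      rw [List.count_cons]
      by_cases hib : i = b
      · simp [hib]
      · simp [hib]
        omega
    rw [step, ih h', sum_map_ite_single _ b (fun _ => (1 : Int)) hN]
    rw [List.countP_cons]
    have hmem : b ∈ PySem.List.pyRange a (m + 1) ↔ a ≤ b := by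
      rw [PySem.List.mem_pyRange_one]
      constructor
      · exact fun hh => hh.1
      · exact fun hh => ⟨hh, by omega⟩
    by_cases hab : a ≤ b
    · simp [hmem.mpr hab, hab]
    · have : b ∉ PySem.List.pyRange a (m + 1) := fun hc => hab (hmem.mp hc)
      simp [this, hab]

lemma countP_range_lt (K : Nat) (C : Int) :
    ((List.range K).countP (fun k : Nat => decide ((k : Int) < C)) : Int) = max 0 (min (K : Int) C) := by
  induction K with
  | zero => simp
  | succ K ih =>
    rw [List.range_succ, List.countP_append]
    push_cast
    rw [ih]
    simp only [List.countP_cons, List.countP_nil]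
    by_cases hK : (K : Int) < C
    · simp [hK]; omega
    · simp [hK]; omega

lemma countP_stride (m d x : Int) (hd : 2 ≤ d) (hx0 : 0 ≤ x) (hxm : x ≤ m) :
    (((PySem.List.pyRange 1 (m + 1) d).countP (fun j => decide (j ≤ x))) : Int) =
      (x + d - 1) / d := by
  have hdp : (0 : Int) < d := by omega
  rw [PySem.List.pyRange_of_pos 1 (m + 1) hdp, List.countP_map]
  set C : Int := (x + d - 1) / d with hC
  have hCK : ∀ K : Nat, ((List.range K).countP
      (fun k : Nat => decide ((1 : Int) + d * k ≤ x)) : Int) = max 0 (min (K : Int) C) → True :=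
    fun _ _ => trivial
  have hpred : (fun k : Nat => decide ((1 : Int) + d * k ≤ x)) =
      (fun k : Nat => decide ((k : Int) < C)) := by
    funext k
    have : ((1 : Int) + d * k ≤ x) ↔ ((k : Int) < C) := by
      constructor
      · intro h
        have h2 : (k : Int) + 1 ≤ C := by
          rw [hC, Int.le_ediv_iff_mul_le hdp]
          nlinarith
        omega
      · intro h
        have h2 : ((k : Int) + 1) * d ≤ x + d - 1 := by
          have := (Int.le_ediv_iff_mul_le hdp (a := (k : Int) + 1) (b := x + d - 1)).mp (by omega)
          exact this
        nlinarith
    simp [this]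
  have hcomp : (fun j : Int => decide (j ≤ x)) ∘ (fun k : Nat => (1 : Int) + d * k) =
      (fun k : Nat => decide ((1 : Int) + d * k ≤ x)) := rfl
  rw [hcomp, hpred, countP_range_lt]
  -- now show max 0 (min K C) = C
  have hC0 : 0 ≤ C := Int.ediv_nonneg (by omega) (by omega)
  by_cases hm1 : 1 < m + 1
  · simp only [if_pos hm1]
    have hEq : m + 1 - 1 + d - 1 = m + d - 1 := by ring
    rw [hEq]
    have hKC : C ≤ ((m + d - 1) / d).toNat := by
      have h1 : C ≤ (m + d - 1) / d := Int.ediv_le_ediv hdp (by omega)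
      have h2 : (0:Int) ≤ (m + d - 1) / d := Int.ediv_nonneg (by omega) (by omega)
      omega
    omega
  · simp only [if_neg hm1]
    have hx0' : x = 0 := by omega
    have : C = 0 := by
      rw [hC, hx0']
      exact Int.ediv_eq_zero_of_lt (by omega) (by omega)
    simp [this]

lemma ceil_mul_sub (d x : Int) (hd : 2 ≤ d) :
    d * ((x + d - 1) / d) - x = PySem.Int.mod (d - PySem.Int.mod x d) d := by
  have hdp : (0 : Int) < d := by omega
  rw [PySem.Int.mod_eq_emod_of_pos hdp, PySem.Int.mod_eq_emod_of_pos hdp]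
  set q : Int := x / d with hq
  set r : Int := x % d with hr
  have hx : d * q + r = x := by
    rw [hq, hr]
    have := Int.ediv_add_emod x d
    linarith
  have hr0 : 0 ≤ r := Int.emod_nonneg x (by omega)
  have hrd : r < d := Int.emod_lt_of_pos x hdp
  have hceil : (x + d - 1) / d = q + (r + d - 1) / d := by
    have : x + d - 1 = (r + d - 1) + q * d := by linear_combination -hx
    rw [this, Int.add_mul_ediv_right _ _ (by omega : d ≠ 0)]
    ring
  rw [hceil]
  by_cases hrz : r = 0
  · have h1 : (r + d - 1) / d = 0 := Int.ediv_eq_zero_of_lt (by omega) (by omega)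
    have h2 : (d - r) % d = 0 := by
      rw [hrz]
      simp
    rw [h1, h2]
    linear_combination hx - hrz
  · have h1 : (r + d - 1) / d = 1 := by
      have : r + d - 1 = (r - 1) + 1 * d := by ring
      rw [this, Int.add_mul_ediv_right _ _ (by omega : d ≠ 0),
        Int.ediv_eq_zero_of_lt (by omega) (by omega)]
      omega
    have h2 : (d - r) % d = d - r := Int.emod_eq_of_lt (by omega) (by omega)
    rw [h1, h2]
    linear_combination hx

lemma bcost (m d : Int) (hd : 2 ≤ d) :
    ∀ l : List Int, (∀ x ∈ l, 0 ≤ x ∧ x ≤ m) →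
      d * ((PySem.List.pyRange 1 (m + 1) d).map
            (fun j => (l.countP (fun x => j ≤ x) : Int))).sum - l.sum =
        (l.map (fun x => PySem.Int.mod (d - PySem.Int.mod x d) d)).sum := by
  intro l
  induction l with
  | nil => simp
  | cons b l ih =>
    intro h
    have hb := h b (by simp)
    have h' : ∀ x ∈ l, 0 ≤ x ∧ x ≤ m := fun x hx => h x (by simp [hx])
    have step : ((PySem.List.pyRange 1 (m + 1) d).map
          (fun j => ((b :: l).countP (fun x => j ≤ x) : Int))).sum =
        ((PySem.List.pyRange 1 (m + 1) d).map
          (fun j => (l.countP (fun x => j ≤ x) : Int))).sum +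
        ((PySem.List.pyRange 1 (m + 1) d).map
          (fun j => if j ≤ b then (1 : Int) else 0)).sum := by
      rw [← PySem.List.sum_map_add_int]
      apply congrArg List.sum
      apply List.map_congr_left
      intro j _
      rw [List.countP_cons]
      by_cases hjb : j ≤ b
      · simp [hjb]
      · simp [hjb]
    have hite : ((PySem.List.pyRange 1 (m + 1) d).map
          (fun j => if j ≤ b then (1 : Int) else 0)).sum =
        (((PySem.List.pyRange 1 (m + 1) d).countP (fun j => decide (j ≤ b))) : Int) := by
      rw [← PySem.List.sum_map_ite_one_zero (fun j => decide (j ≤ b))]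
      apply congrArg List.sum
      apply List.map_congr_left
      intro j _
      by_cases hjb : j ≤ b <;> simp [hjb]
    rw [step]
    rw [List.map_cons, List.sum_cons, List.sum_cons, mul_add, hite,
      countP_stride m d b hd hb.1 hb.2]
    have := ceil_mul_sub d b hd
    have ihl := ih h'
    linarith [ihl, this]


lemma pvWhileL_min (cnt : List Int) (d m : Int)
    (hterm : ∀ j : Int, 0 ≤ j → 0 ≤ PySem.List.pyGetD cnt j 0 * PySem.Int.mod (d - PySem.Int.mod j d) d) :
    ∀ (n : Nat) (i temp ans : Int), 0 ≤ i → (m + 1 - i).toNat = n →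
      min ans (pvWhileL cnt d m ans i temp) =
        min ans (temp + ((PySem.List.pyRange i (m + 1)).map
          (fun j => PySem.List.pyGetD cnt j 0 * PySem.Int.mod (d - PySem.Int.mod j d) d)).sum) := by
  intro n
  induction n with
  | zero =>
    intro i temp ans hi h0
    have him : m < i := by omega
    rw [pvWhileL]
    rw [dif_neg (by omega)]
    rw [PySem.List.pyRange_one_eq_nil (by omega)]
    simp
  | succ n ih =>
    intro i temp ans hi hn
    have him : i ≤ m := by omega
    rw [pvWhileL]
    by_cases hcond : i ≤ m ∧ temp < ans
    · rw [dif_pos hcond]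
      rw [ih (i + 1) _ ans (by omega) (by omega)]
      rw [PySem.List.pyRange_one_cons (by omega : i < m + 1), List.map_cons, List.sum_cons]
      ring_nf
    · rw [dif_neg hcond]
      have hta : ans ≤ temp := by omega
      have hS : 0 ≤ ((PySem.List.pyRange i (m + 1)).map
          (fun j => PySem.List.pyGetD cnt j 0 * PySem.Int.mod (d - PySem.Int.mod j d) d)).sum := by
        apply List.sum_nonneg
        intro y hy
        obtain ⟨j, hj, rfl⟩ := List.mem_map.mp hy
        have hj' := PySem.List.mem_pyRange_one.mp hj
        exact hterm j (by omega)
      rw [min_eq_left hta, min_eq_left (by omega)]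

lemma suf_fold (cnt : List Int) (m : Int) (hm : 0 ≤ m) :
    ∀ (n : Nat) (t : Int) (s : List Int), 0 ≤ t → t ≤ m → t.toNat = n →
      s.length = (m + 2).toNat →
      (∀ j : Int, t < j → j ≤ m + 1 →
        PySem.List.pyGetD s j 0 =
          ((PySem.List.pyRange j (m + 1)).map (fun i => PySem.List.pyGetD cnt i 0)).sum) →
      ∀ j : Int, 0 < j → j ≤ m + 1 →
        PySem.List.pyGetD ((PySem.List.pyRange t 0 (-1)).foldl
          (fun s j => PySem.List.pySetD s j
            (PySem.List.pyGetD s (j + 1) 0 + PySem.List.pyGetD cnt j 0)) s) j 0 =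
          ((PySem.List.pyRange j (m + 1)).map (fun i => PySem.List.pyGetD cnt i 0)).sum := by
  intro n
  induction n with
  | zero =>
    intro t s ht0 htm htn hlen hinv j hj0 hjm
    have ht : t = 0 := by omega
    subst ht
    rw [PySem.List.pyRange_neg_one_eq_nil (by omega)]
    exact hinv j (by omega) hjm
  | succ n ih =>
    intro t s ht0 htm htn hlen hinv j hj0 hjm
    have ht1 : 1 ≤ t := by omega
    rw [PySem.List.pyRange_neg_one_cons (by omega : (0:Int) < t), List.foldl_cons]
    set s' := PySem.List.pySetD s t (PySem.List.pyGetD s (t + 1) 0 + PySem.List.pyGetD cnt t 0) with hs'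
    have hlen' : s'.length = (m + 2).toNat := by
      rw [hs', PySem.List.length_pySetD, hlen]
    have htlt : t.toNat < s.length := by omega
    have hgetD : ∀ jj : Int, 0 ≤ jj → PySem.List.pyGetD s' jj 0 =
        if jj = t then PySem.List.pyGetD s (t + 1) 0 + PySem.List.pyGetD cnt t 0
        else PySem.List.pyGetD s jj 0 := by
      intro jj hjj
      have h1 : jj = ((jj.toNat : Nat) : Int) := by omega
      have h2 : t = ((t.toNat : Nat) : Int) := by omega
      rw [hs', h2, h1, PySem.List.pyGetD_pySetD_natCast s t.toNat jj.toNat _ 0 htlt]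
      have he : (jj.toNat = t.toNat) ↔ (((jj.toNat : Nat) : Int) = ((t.toNat : Nat) : Int)) := by omega
      split_ifs with ha hb hb
      · rfl
      · exact absurd (he.mp ha) hb
      · exact absurd (he.mpr hb) ha
      · rfl
    have hinv' : ∀ jj : Int, t - 1 < jj → jj ≤ m + 1 →
        PySem.List.pyGetD s' jj 0 =
          ((PySem.List.pyRange jj (m + 1)).map (fun i => PySem.List.pyGetD cnt i 0)).sum := by
      intro jj hjj1 hjj2
      rw [hgetD jj (by omega)]
      by_cases hjt : jj = t
      · rw [if_pos hjt, hjt]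
        rw [hinv (t + 1) (by omega) (by omega)]
        rw [PySem.List.pyRange_one_cons (by omega : t < m + 1), List.map_cons, List.sum_cons]
        ring
      · rw [if_neg hjt]
        exact hinv jj (by omega) hjj2
    exact ih (t - 1) s' (by omega) (by omega) (by omega) hlen' hinv' j hj0 hjm

lemma replicate_pyGetD (k : Nat) (i : Nat) :
    PySem.List.pyGetD (List.replicate k (0 : Int)) (i : Int) 0 = 0 := by
  rw [PySem.List.pyGetD_natCast]
  rcases Nat.lt_or_ge i k with h | h
  · simp [List.getD_eq_getElem?_getD, h]
  · simp [List.getD_eq_getElem?_getD, Nat.not_lt.mpr h]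

-- ===== VERDICT (by name: the statement is the Claim_ definition above) =====
theorem cardPackets_spec : Claim_equal_cardPackets := by
  intro l _ hpre
  obtain ⟨hne, hpos⟩ := hpre
  unfold Spec_cardPackets cardPackets cardPackets_alt
  cases hM : PySem.List.max? l (fun x : Int => x) with
  | none => exact absurd ((PySem.List.max?_eq_none_iff l (fun x : Int => x)).mp hM) hne
  | some m =>
    have hmem : m ∈ l := PySem.List.max?_mem hM
    have hm0 : 0 ≤ m := hpos m hmem
    have hmax : ∀ x ∈ l, x ≤ m := fun x hx => PySem.List.max?_isMax hM x hx
    dsimp only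
    set cAA := (PySem.List.pyRange 0 (l.length : Int)).foldl
      (fun c i => pvBump c (PySem.List.pyGetD l i 0)) (Array.replicate (m + 1).toNat 0) with hcAA
    set cBA := l.foldl pvBump (Array.replicate (m + 2).toNat 0) with hcBA
    set sufA := (PySem.List.pyRange m 0 (-1)).foldl
      (fun s j => pvArrSet s j (pvArrGet s (j + 1) + pvArrGet cBA j))
      (Array.replicate (m + 2).toNat 0) with hsufA
    set cA := l.foldl pvBumpL (List.replicate (m + 1).toNat 0) with hcA
    set cB := l.foldl pvBumpL (List.replicate (m + 2).toNat 0) with hcB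
    set suf := (PySem.List.pyRange m 0 (-1)).foldl
      (fun s j => PySem.List.pySetD s j
        (PySem.List.pyGetD s (j + 1) 0 + PySem.List.pyGetD cB j 0))
      (List.replicate (m + 2).toNat 0) with hsufdef
    -- array contents = list-level models
    have hcAA_list : cAA.toList = cA := by
      rw [hcAA, foldl_toList (F := fun c i => pvBump c (PySem.List.pyGetD l i 0))
        (G := fun c i => pvBumpL c (PySem.List.pyGetD l i 0)) (fun a x => pvBump_toList a _),
        Array.toList_replicate, PySem.List.foldl_pyRange_zero_pyGetD' l 0 pvBumpL, hcA]
    have hcBA_list : cBA.toList = cB := by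
      rw [hcBA, foldl_toList (F := pvBump) (G := pvBumpL) (fun a x => pvBump_toList a x),
        Array.toList_replicate, hcB]
    have hsufA_list : sufA.toList = suf := by
      rw [hsufA, foldl_toList
        (F := fun s j => pvArrSet s j (pvArrGet s (j + 1) + pvArrGet cBA j))
        (G := fun s j => PySem.List.pySetD s j
          (PySem.List.pyGetD s (j + 1) 0 + PySem.List.pyGetD cB j 0))
        (fun a x => by rw [pvArrSet_toList, pvArrGet_eq, pvArrGet_eq, hcBA_list]),
        Array.toList_replicate, hsufdef]
    -- counting characterisations
    have hbA : ∀ x ∈ l, 0 ≤ x ∧ x < ((List.replicate (m + 1).toNat (0:Int)).length : Int) := by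
      intro x hx
      have := hpos x hx
      have := hmax x hx
      simp [List.length_replicate]
      constructor <;> omega
    have hbB : ∀ x ∈ l, 0 ≤ x ∧ x < ((List.replicate (m + 2).toNat (0:Int)).length : Int) := by
      intro x hx
      have := hpos x hx
      have := hmax x hx
      simp [List.length_replicate]
      constructor <;> omega
    have hcntA : ∀ j : Int, 0 ≤ j → PySem.List.pyGetD cA j 0 = (l.count j : Int) := by
      intro j hj
      have hjn : j = ((j.toNat : Nat) : Int) := by omega
      rw [hcA, hjn, foldl_pvBumpL_getD l _ hbA j.toNat, replicate_pyGetD]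
      ring
    have hcntB : ∀ j : Int, 0 ≤ j → PySem.List.pyGetD cB j 0 = (l.count j : Int) := by
      intro j hj
      have hjn : j = ((j.toNat : Nat) : Int) := by omega
      rw [hcB, hjn, foldl_pvBumpL_getD l _ hbB j.toNat, replicate_pyGetD]
      ring
    -- suffix characterisation
    have hsuf : ∀ j : Int, 0 < j → j ≤ m + 1 →
        PySem.List.pyGetD suf j 0 = (l.countP (fun x => j ≤ x) : Int) := by
      intro j hj0 hjm
      rw [hsufdef]
      rw [suf_fold cB m hm0 m.toNat m (List.replicate (m + 2).toNat 0) hm0 le_rfl rfl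
        (by simp [List.length_replicate])
        (by
          intro jj hjj1 hjj2
          have hjj : jj = m + 1 := by omega
          subst hjj
          rw [PySem.List.pyRange_one_eq_nil (by omega)]
          have hn : (m + 1) = (((m+1).toNat : Nat) : Int) := by omega
          rw [hn, replicate_pyGetD]
          simp)
        j hj0 hjm]
      have hmap : (PySem.List.pyRange j (m + 1)).map (fun i => PySem.List.pyGetD cB i 0) =
          (PySem.List.pyRange j (m + 1)).map (fun i => (l.count i : Int)) := by
        apply List.map_congr_left
        intro i hi
        have hi' := PySem.List.mem_pyRange_one.mp hi
        exact hcntB i (by omega)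
      rw [hmap, sum_count_eq_countP m j l (fun x hx => ⟨hpos x hx, hmax x hx⟩)]
    -- compare the two outer folds
    apply PySem.List.foldl_congr_mem
    intro a d hd
    have hd' := PySem.List.mem_pyRange_one.mp hd
    have hd2 : 2 ≤ d := hd'.1
    have hdp : (0:Int) < d := by omega
    -- A side
    rw [pvWhileA_eq cAA d m a (m + 1 - 0).toNat 0 0 rfl, hcAA_list]
    have hterm : ∀ j : Int, 0 ≤ j →
        0 ≤ PySem.List.pyGetD cA j 0 * PySem.Int.mod (d - PySem.Int.mod j d) d := by
      intro j hj
      rw [hcntA j hj]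
      exact mul_nonneg (by positivity) (PySem.Int.mod_nonneg _ hdp)
    rw [pvWhileL_min cA d m hterm (m + 1).toNat 0 0 a le_rfl (by omega)]
    have hsumA : ((PySem.List.pyRange 0 (m + 1)).map
        (fun j => PySem.List.pyGetD cA j 0 * PySem.Int.mod (d - PySem.Int.mod j d) d)).sum =
        (l.map (fun x => PySem.Int.mod (d - PySem.Int.mod x d) d)).sum := by
      have hmap : (PySem.List.pyRange 0 (m + 1)).map
          (fun j => PySem.List.pyGetD cA j 0 * PySem.Int.mod (d - PySem.Int.mod j d) d) =
          (PySem.List.pyRange 0 (m + 1)).map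
          (fun j => (l.count j : Int) * PySem.Int.mod (d - PySem.Int.mod j d) d) := by
        apply List.map_congr_left
        intro i hi
        have hi' := PySem.List.mem_pyRange_one.mp hi
        rw [hcntA i (by omega)]
      rw [hmap, sum_count_mul (PySem.List.pyRange 0 (m + 1))
        (fun j => PySem.Int.mod (d - PySem.Int.mod j d) d) (PySem.List.nodup_pyRange_one 0 (m + 1)) l
        (fun x hx => PySem.List.mem_pyRange_one.mpr ⟨hpos x hx, by have := hmax x hx; omega⟩)]
    rw [hsumA]
    -- B side
    rw [PySem.List.foldl_add (PySem.List.pyRange 1 (m + 1) d) (fun j => pvArrGet sufA j) 0]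
    have hmapB : (PySem.List.pyRange 1 (m + 1) d).map (fun j => pvArrGet sufA j) =
        (PySem.List.pyRange 1 (m + 1) d).map (fun j => (l.countP (fun x => j ≤ x) : Int)) := by
      apply List.map_congr_left
      intro j hj
      have hj' := (PySem.List.mem_pyRange_iff_of_pos hdp j).mp hj
      rw [pvArrGet_eq, hsufA_list]
      exact hsuf j (by omega) (by omega)
    rw [hmapB]
    simp only [zero_add]
    rw [bcost m d hd2 l (fun x hx => ⟨hpos x hx, hmax x hx⟩)]
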